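-- pv_equiv track=rewrite | github.com/ajakeguy/waste-directory | pipelines/me-dep-import/index.py | detect_column_offsets
-- ===== SOURCE A (Python) =====
-- def detect_column_offsets(header_line: str) -> list[int]:
--     """Return the character position where each column header token starts."""
--     offsets: list[int] = []
--     in_word = False
--     for i, ch in enumerate(header_line):
--         if ch != " " and not in_word:
--             offsets.append(i)
--             in_word = True
--         elif ch == " ":
--             in_word = False
--     return offsets
-- ===== SOURCE B (Python) =====
-- def detect_column_offsets(header_line: str) -> list[int]:
--     """Return the character position where each column header token starts."""
--     offsets: list[int] = []
--     pos = 0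
--     for part in header_line.split(" "):
--         if part:
--             offsets.append(pos)
--         pos += len(part) + 1
--     return offsets
-- ===== Notes on version B (the rewrite author's own statement) =====
-- stated objective: alternative
-- what changed: Replaced the per-character in_word state machine with a staged computation: split the line on the literal space character, then walk the parts accumulating each part's start position from a running prefix sum of part lengths, recording the position of every non-empty part.
import Mathlib
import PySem

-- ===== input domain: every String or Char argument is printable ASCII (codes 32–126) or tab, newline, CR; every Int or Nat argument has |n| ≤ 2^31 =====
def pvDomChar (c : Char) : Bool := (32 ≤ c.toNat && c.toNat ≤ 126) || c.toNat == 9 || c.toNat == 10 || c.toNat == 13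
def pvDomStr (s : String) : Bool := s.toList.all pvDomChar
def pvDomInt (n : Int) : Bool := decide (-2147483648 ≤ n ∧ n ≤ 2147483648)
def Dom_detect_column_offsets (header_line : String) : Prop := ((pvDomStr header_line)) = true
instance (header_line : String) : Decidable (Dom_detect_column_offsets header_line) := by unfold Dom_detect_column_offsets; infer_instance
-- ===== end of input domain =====

-- B replaces A's per-character in_word state machine by a staged computation:
-- split on the literal space, then a prefix-sum walk over the parts (alternative, same cost).

-- ===== PORT A =====
def detect_column_offsets (header_line : String) : List Int :=
  ((PySem.List.enumerate header_line.toList 0).foldl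
    (fun (st : List Int × Bool) (p : Int × Char) =>
      if p.2 ≠ ' ' ∧ st.2 = false then (st.1 ++ [p.1], true)
      else if p.2 = ' ' then (st.1, false)
      else st)
    ([], false)).1

-- ===== PORT B =====
-- header_line.split(" ") → PySem.Chars.splitOn; then the running-position fold over the parts
def detect_column_offsets_alt (header_line : String) : List Int :=
  ((PySem.Chars.splitOn header_line.toList " ".toList).foldl
    (fun (st : List Int × Int) (part : List Char) =>
      (if part ≠ [] then st.1 ++ [st.2] else st.1, st.2 + part.length + 1))
    ([], 0)).1

-- ===== PRECONDITION & SPEC =====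
def Spec_detect_column_offsets (header_line : String) (out : List Int) : Prop := out = detect_column_offsets_alt header_line
instance (header_line : String) (out : List Int) : Decidable (Spec_detect_column_offsets header_line out) := by unfold Spec_detect_column_offsets; infer_instance

-- ===== CLAIM (what is proved, stated in full; the proofs are below) =====
def Claim_equal_detect_column_offsets : Prop := ∀ (header_line : String), Dom_detect_column_offsets header_line → Spec_detect_column_offsets header_line (detect_column_offsets header_line)

-- ===== LEMMAS AND PROOFS =====

-- reference recursion: offsets of maximal non-space runs (pvScan = outside a word, pvSkip = inside)
mutual
def pvScan : List Char → Int → List Int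
  | [], _ => []
  | c :: cs, i => if c = ' ' then pvScan cs (i + 1) else i :: pvSkip cs (i + 1)
def pvSkip : List Char → Int → List Int
  | [], _ => []
  | c :: cs, i => if c = ' ' then pvScan cs (i + 1) else pvSkip cs (i + 1)
end

-- A's fold equals the reference recursion
theorem pv_fold_eq : ∀ (cs : List Char) (i : Int) (acc : List Int),
    (((PySem.List.enumerate cs i).foldl
      (fun (st : List Int × Bool) (p : Int × Char) =>
        if p.2 ≠ ' ' ∧ st.2 = false then (st.1 ++ [p.1], true)
        else if p.2 = ' ' then (st.1, false)
        else st)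
      (acc, false)).1 = acc ++ pvScan cs i)
  ∧ (((PySem.List.enumerate cs i).foldl
      (fun (st : List Int × Bool) (p : Int × Char) =>
        if p.2 ≠ ' ' ∧ st.2 = false then (st.1 ++ [p.1], true)
        else if p.2 = ' ' then (st.1, false)
        else st)
      (acc, true)).1 = acc ++ pvSkip cs i)
  | [], i, acc => by simp [PySem.List.enumerate_nil, pvScan, pvSkip]
  | c :: cs, i, acc => by
    by_cases h : c = ' '
    · simp [PySem.List.enumerate_cons, pvScan, pvSkip, h, (pv_fold_eq cs (i+1) acc).1]
    · simp [PySem.List.enumerate_cons, pvScan, pvSkip, h, (pv_fold_eq cs (i+1) acc).2,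
        (pv_fold_eq cs (i+1) (acc ++ [i])).2]

-- simple structural recursion equal to splitOn on a single space
def pvSplitSp : List Char → List Char → List (List Char)
  | [], cur => [cur.reverse]
  | c :: rest, cur => if c = ' ' then cur.reverse :: pvSplitSp rest [] else pvSplitSp rest (c :: cur)

theorem pv_go_eq : ∀ (fuel : Nat) (l cur : List Char) (acc : List (List Char)),
    l.length < fuel →
    PySem.Chars.splitOn.go [' '] fuel l cur acc = acc.reverse ++ pvSplitSp l cur := by
  intro fuel
  induction fuel with
  | zero => intro l cur acc h; omega
  | succ fuel ih =>
    intro l cur acc h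
    cases l with
    | nil => simp [PySem.Chars.splitOn.go, pvSplitSp]
    | cons c rest =>
      by_cases hc : c = ' '
      · subst hc
        simp only [PySem.Chars.splitOn.go]
        norm_num [List.isPrefixOf]
        rw [ih rest [] (cur.reverse :: acc) (by simpa using Nat.lt_of_succ_lt_succ h)]
        simp [pvSplitSp]
      · have hp : ([' '] : List Char).isPrefixOf (c :: rest) = false := by
          simp [List.isPrefixOf_cons₂]; exact fun h' => (hc h'.symm).elim
        simp only [PySem.Chars.splitOn.go, hp, Bool.false_eq_true, if_false]
        rw [ih rest (c :: cur) acc (by simpa using Nat.lt_of_succ_lt_succ h)]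
        simp [pvSplitSp, hc]

theorem pv_splitOn_eq (s : List Char) :
    PySem.Chars.splitOn s [' '] = pvSplitSp s [] := by
  have := pv_go_eq (s.length + 1) s [] [] (by omega)
  simpa [PySem.Chars.splitOn] using this

-- named form of B's fold, with controlled equations
def pvFoldF : List (List Char) → List Int × Int → List Int × Int
  | [], st => st
  | part :: parts, st =>
      pvFoldF parts (if part ≠ [] then st.1 ++ [st.2] else st.1, st.2 + part.length + 1)

theorem pvFoldF_eq_foldl : ∀ (parts : List (List Char)) (st : List Int × Int),
    parts.foldl
      (fun (st : List Int × Int) (part : List Char) =>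
        (if part ≠ [] then st.1 ++ [st.2] else st.1, st.2 + part.length + 1)) st
    = pvFoldF parts st
  | [], st => rfl
  | part :: parts, st => by
    rw [List.foldl_cons, pvFoldF, pvFoldF_eq_foldl parts]

-- B's fold over the parts equals the reference recursion
theorem pv_split_fold_eq : ∀ (l cur : List Char) (p : Int) (acc : List Int),
    (pvFoldF (pvSplitSp l cur) (acc, p)).1
    = acc ++ (match cur with
              | [] => pvScan l p
              | _ :: _ => p :: pvSkip l (p + cur.length))
  | [], cur, p, acc => by
    cases cur with
    | nil => simp [pvSplitSp, pvFoldF, pvScan]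
    | cons c cs => simp [pvSplitSp, pvFoldF, pvSkip]
  | c :: rest, cur, p, acc => by
    by_cases hc : c = ' '
    · cases cur with
      | nil =>
        rw [pvSplitSp, if_pos hc, pvFoldF, pv_split_fold_eq rest []]
        subst hc
        simp [pvScan]
      | cons d ds =>
        rw [pvSplitSp, if_pos hc, pvFoldF, pv_split_fold_eq rest []]
        subst hc
        simp [pvSkip]
    · cases cur with
      | nil =>
        rw [pvSplitSp, if_neg hc]
        rw [pv_split_fold_eq rest [c] p acc]
        simp [pvScan, hc]
      | cons d ds =>
        rw [pvSplitSp, if_neg hc]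
        rw [pv_split_fold_eq rest (c :: d :: ds) p acc]
        simp only [pvSkip, hc, List.length_cons]
        congr 2
        push_cast
        ring_nf

-- ===== VERDICT (by name: the statement is the Claim_ definition above) =====
theorem detect_column_offsets_spec : Claim_equal_detect_column_offsets := by
  intro s _
  unfold Spec_detect_column_offsets detect_column_offsets detect_column_offsets_alt
  rw [show (" ".toList) = [' '] from rfl, pv_splitOn_eq, pvFoldF_eq_foldl]
  rw [(pv_fold_eq s.toList 0 []).1, pv_split_fold_eq s.toList [] 0 []]
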